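-- pv_equiv track=rewrite | github.com/rjwen2045458/UoE_CPSLP | CPSLP11.4/nltk_intro.py | token_frequencies
-- ===== SOURCE A (Python) =====
-- def token_frequencies(tokens):
--     dict = {}
--     for token in tokens:
--         if token in dict:
--             dict[token] +=1
--         else:
--             dict[token] = 1
--     return dict
-- ===== SOURCE B (Python) =====
-- def token_frequencies(tokens):
--     distinct = dict.fromkeys(tokens)
--     return {t: tokens.count(t) for t in distinct}
-- ===== Notes on version B (the rewrite author's own statement) =====
-- stated objective: alternative
-- what changed: B replaces the single accumulating-dict pass with a two-phase strategy: first deduplicate the tokens (first occurrences, in order), then count each distinct token by a full scan with list.count.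
import Mathlib
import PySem

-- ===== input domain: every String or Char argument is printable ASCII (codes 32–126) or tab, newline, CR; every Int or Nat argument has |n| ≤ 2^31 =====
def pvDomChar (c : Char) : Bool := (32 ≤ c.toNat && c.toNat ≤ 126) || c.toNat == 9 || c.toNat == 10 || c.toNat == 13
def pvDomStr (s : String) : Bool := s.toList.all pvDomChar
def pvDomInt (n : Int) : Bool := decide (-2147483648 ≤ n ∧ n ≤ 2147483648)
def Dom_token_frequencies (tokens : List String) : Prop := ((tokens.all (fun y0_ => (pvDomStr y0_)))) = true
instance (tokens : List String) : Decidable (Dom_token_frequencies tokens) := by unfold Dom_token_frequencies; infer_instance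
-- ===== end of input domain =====

-- B replaces A's single accumulating-dict pass by deduplicate-then-count-each (alternative decomposition, not faster).

-- ===== PORT A =====
-- literal port: one pass, a dict accumulator; 'if token in dict: dict[token] += 1 else: dict[token] = 1'
def token_frequencies (tokens : List String) : List (String × Int) :=
  (tokens.foldl
    (fun d token =>
      if d.contains token then d.insert token (d.getD token 0 + 1)
      else d.insert token 1)
    (PySem.Dict.empty : PySem.Dict String Int)).items

-- ===== PORT B =====
-- literal port of Source B: dict.fromkeys dedup, then one full count per distinct token
def token_frequencies_alt (tokens : List String) : List (String × Int) :=
  (PySem.List.dedup tokens).map (fun t => (t, (tokens.count t : Int)))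

-- ===== PRECONDITION & SPEC =====
def Spec_token_frequencies (tokens : List String) (out : List (String × Int)) : Prop := out = token_frequencies_alt tokens
instance (tokens : List String) (out : List (String × Int)) : Decidable (Spec_token_frequencies tokens out) := by unfold Spec_token_frequencies; infer_instance

-- ===== CLAIM (what is proved, stated in full; the proofs are below) =====
def Claim_equal_token_frequencies : Prop := ∀ (tokens : List String), Dom_token_frequencies tokens → Spec_token_frequencies tokens (token_frequencies tokens)

-- ===== LEMMAS AND PROOFS =====

-- A's branchy step is the unconditional 'insert token (getD token 0 + 1)' step (getD = 0 when absent)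
theorem tf_step_eq (d : PySem.Dict String Int) (token : String) :
    (if d.contains token then d.insert token (d.getD token 0 + 1) else d.insert token 1)
      = d.insert token (d.getD token 0 + 1) := by
  by_cases h : d.contains token = true
  · simp [h]
  · simp only [Bool.not_eq_true] at h
    rw [PySem.Dict.getD_of_not_contains (h := h)]
    simp [h]

-- ===== VERDICT (by name: the statement is the Claim_ definition above) =====
theorem token_frequencies_spec : Claim_equal_token_frequencies := by
  intro tokens _
  unfold Spec_token_frequencies token_frequencies token_frequencies_alt
  have hstep : (tokens.foldl
      (fun d token =>
        if d.contains token then d.insert token (d.getD token 0 + 1)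
        else d.insert token 1)
      (PySem.Dict.empty : PySem.Dict String Int))
      = tokens.foldl (fun d x => d.insert x (d.getD x 0 + 1)) PySem.Dict.empty := by
    congr 1
    funext d token
    exact tf_step_eq d token
  rw [hstep, PySem.Dict.foldl_insert_getD_add_one_eq_counter, PySem.Dict.items_counter]
  simp [PySem.List.dedup_eq_ofList]
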